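-- pv_equiv track=rewrite | github.com/RaimundoLorca/roboticafcfm2021-1 | Laboratorio_7/LAB 7C.py | eval_fitness
-- ===== SOURCE A (Python) =====
-- BOARD_SIZE = 8
--
-- def eval_fitness(genome):
--
--     """
--       -> pyevolve.genome
--
--       Determina la cantidad de reinas que no están siendo amenazas
--       por otra de las piezas.
--
--       :param pyevolve.genome genome: individuo al cual se le calcula el fitness.
--
--       :return: int, número de piezas a salvo.
--
--     """
--
--     collisions = 0
--     # Restringir que cada reina esté en una fila distinta
--     for i in range(BOARD_SIZE):
--        if i not in genome: return 0
--
--     # Determinar si hay más de una reina en una diagonal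
--     for i in range(BOARD_SIZE):
--        col = False
--        for j in range(BOARD_SIZE):
--           if (i != j) and (abs(i-j) == abs(genome[j]-genome[i])):
--              col = True
--        if col == True: collisions +=1
--
--     return BOARD_SIZE-collisions
-- ===== SOURCE B (Python) =====
-- BOARD_SIZE = 8
--
-- def eval_fitness(genome):
--     # Row guard, same as the original.
--     for i in range(BOARD_SIZE):
--         if i not in genome:
--             return 0
--     # Diagonal occupancy tables: one pass instead of the nested pairwise scan.
--     diff = {}
--     summ = {}
--     for j in range(BOARD_SIZE):
--         diff[j - genome[j]] = diff.get(j - genome[j], 0) + 1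
--         summ[j + genome[j]] = summ.get(j + genome[j], 0) + 1
--     safe = 0
--     for i in range(BOARD_SIZE):
--         if diff[i - genome[i]] == 1 and summ[i + genome[i]] == 1:
--             safe += 1
--     return safe
-- ===== Notes on version B (the rewrite author's own statement) =====
-- stated objective: alternative
-- what changed: A's nested pairwise diagonal scan (for each queen, test all other queens) is replaced by building two diagonal-occupancy tables (j-genome[j] and j+genome[j]) in one pass and then counting as safe the queens whose two diagonal groups each have exactly one occupant.
import Mathlib
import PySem

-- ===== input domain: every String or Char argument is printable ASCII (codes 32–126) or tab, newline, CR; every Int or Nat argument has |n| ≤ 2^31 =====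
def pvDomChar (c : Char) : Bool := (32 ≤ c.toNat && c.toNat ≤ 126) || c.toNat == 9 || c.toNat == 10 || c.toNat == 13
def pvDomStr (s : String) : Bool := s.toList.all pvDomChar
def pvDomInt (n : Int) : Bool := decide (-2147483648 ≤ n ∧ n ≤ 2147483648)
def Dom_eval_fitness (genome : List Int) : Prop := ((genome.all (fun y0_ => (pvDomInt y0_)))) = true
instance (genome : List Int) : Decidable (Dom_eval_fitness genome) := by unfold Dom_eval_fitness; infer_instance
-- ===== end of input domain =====

-- B replaces A's nested pairwise diagonal scan by two diagonal-occupancy tables built in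
-- one pass, then a single pass counting the safe queens (objective: alternative algorithm).

-- ===== PORT A =====
def eval_fitness (genome : List Int) : Int :=
  if (List.range 8).any (fun i => !(genome.contains (i : Int))) then 0
  else
    8 - (List.range 8).foldl (fun collisions (i : Nat) =>
      if (List.range 8).foldl (fun col (j : Nat) =>
            if i ≠ j ∧ ((i : Int) - (j : Int)).natAbs
                = (PySem.List.pyGetD genome (j : Int) 0
                   - PySem.List.pyGetD genome (i : Int) 0).natAbs
            then true else col) false = true
      then collisions + 1 else collisions) 0

-- ===== PORT B =====
-- B-side helper: the two diagonal-occupancy dicts (diff, summ) built in one pass.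
def pvTables (genome : List Int) : PySem.Dict Int Int × PySem.Dict Int Int :=
  (List.range 8).foldl (fun p (j : Nat) =>
    (p.1.insert ((j : Int) - PySem.List.pyGetD genome (j : Int) 0)
        (p.1.getD ((j : Int) - PySem.List.pyGetD genome (j : Int) 0) 0 + 1),
     p.2.insert ((j : Int) + PySem.List.pyGetD genome (j : Int) 0)
        (p.2.getD ((j : Int) + PySem.List.pyGetD genome (j : Int) 0) 0 + 1)))
    (PySem.Dict.empty, PySem.Dict.empty)

def eval_fitness_alt (genome : List Int) : Int :=
  if (List.range 8).any (fun i => !(genome.contains (i : Int))) then 0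
  else
    (List.range 8).foldl (fun safe (i : Nat) =>
      if (pvTables genome).1.getD ((i : Int) - PySem.List.pyGetD genome (i : Int) 0) 0 = 1
         ∧ (pvTables genome).2.getD ((i : Int) + PySem.List.pyGetD genome (i : Int) 0) 0 = 1
      then safe + 1 else safe) 0

-- ===== PRECONDITION & SPEC =====
def Spec_eval_fitness (genome : List Int) (out : Int) : Prop := out = eval_fitness_alt genome
instance (genome : List Int) (out : Int) : Decidable (Spec_eval_fitness genome out) := by unfold Spec_eval_fitness; infer_instance

-- ===== CLAIM (what is proved, stated in full; the proofs are below) =====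
def Claim_equal_eval_fitness : Prop := ∀ (genome : List Int), Dom_eval_fitness genome → Spec_eval_fitness genome (eval_fitness genome)

-- ===== LEMMAS AND PROOFS =====

-- A's inner collision loop is a Boolean "or" over the range.
lemma pv_foldl_or (p : Nat → Prop) [DecidablePred p] (l : List Nat) (b : Bool) :
    l.foldl (fun c j => if p j then true else c) b = (b || l.any fun j => decide (p j)) := by
  induction l generalizing b with
  | nil => simp
  | cons x xs ih =>
    rw [List.foldl_cons, ih]
    by_cases h : p x <;> simp [h]

-- B's table-building loop over a pair of dicts splits into two independent folds.
lemma pv_tables_split (genome : List Int) :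
    pvTables genome =
      ((List.range 8).foldl (fun d (j : Nat) =>
          d.insert ((j : Int) - PySem.List.pyGetD genome (j : Int) 0)
            (d.getD ((j : Int) - PySem.List.pyGetD genome (j : Int) 0) 0 + 1)) PySem.Dict.empty,
       (List.range 8).foldl (fun d (j : Nat) =>
          d.insert ((j : Int) + PySem.List.pyGetD genome (j : Int) 0)
            (d.getD ((j : Int) + PySem.List.pyGetD genome (j : Int) 0) 0 + 1)) PySem.Dict.empty) := by
  have H : ∀ (l : List Nat) (d1 d2 : PySem.Dict Int Int),
      l.foldl (fun p (j : Nat) =>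
        (p.1.insert ((j : Int) - PySem.List.pyGetD genome (j : Int) 0)
            (p.1.getD ((j : Int) - PySem.List.pyGetD genome (j : Int) 0) 0 + 1),
         p.2.insert ((j : Int) + PySem.List.pyGetD genome (j : Int) 0)
            (p.2.getD ((j : Int) + PySem.List.pyGetD genome (j : Int) 0) 0 + 1))) (d1, d2)
      = (l.foldl (fun d (j : Nat) =>
            d.insert ((j : Int) - PySem.List.pyGetD genome (j : Int) 0)
              (d.getD ((j : Int) - PySem.List.pyGetD genome (j : Int) 0) 0 + 1)) d1,
         l.foldl (fun d (j : Nat) =>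
            d.insert ((j : Int) + PySem.List.pyGetD genome (j : Int) 0)
              (d.getD ((j : Int) + PySem.List.pyGetD genome (j : Int) 0) 0 + 1)) d2) := by
    intro l
    induction l with
    | nil => intro d1 d2; rfl
    | cons x xs ih => intro d1 d2; simp only [List.foldl_cons]; exact ih _ _
  exact H (List.range 8) PySem.Dict.empty PySem.Dict.empty

-- A counting fold with insert/getD: the built table's entry at v counts the hits of v.
lemma pv_fold_insert_getD (f : Nat → Int) (l : List Nat) (d : PySem.Dict Int Int) (v : Int) :
    (l.foldl (fun d j => d.insert (f j) (d.getD (f j) 0 + 1)) d).getD v 0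
      = d.getD v 0 + (l.countP (fun j => f j == v) : Int) := by
  induction l generalizing d with
  | nil => simp
  | cons x xs ih =>
    rw [List.foldl_cons, ih, List.countP_cons]
    by_cases h : f x = v
    · subst h
      rw [PySem.Dict.getD_insert_self]
      simp
      ring
    · rw [PySem.Dict.getD_insert_of_ne _ _ _ (Ne.symm h)]
      simp [h]

-- The two tables look up as occupancy counts of the corresponding diagonal.
lemma pv_table_fst (genome : List Int) (v : Int) :
    (pvTables genome).1.getD v 0
      = ((List.range 8).countP (fun (j : Nat) => ((j : Int) - PySem.List.pyGetD genome (j : Int) 0) == v) : Int) := by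
  rw [pv_tables_split]
  simpa using pv_fold_insert_getD
    (fun j => (j : Int) - PySem.List.pyGetD genome (j : Int) 0) (List.range 8) PySem.Dict.empty v

lemma pv_table_snd (genome : List Int) (v : Int) :
    (pvTables genome).2.getD v 0
      = ((List.range 8).countP (fun (j : Nat) => ((j : Int) + PySem.List.pyGetD genome (j : Int) 0) == v) : Int) := by
  rw [pv_tables_split]
  simpa using pv_fold_insert_getD
    (fun j => (j : Int) + PySem.List.pyGetD genome (j : Int) 0) (List.range 8) PySem.Dict.empty v

-- On a duplicate-free list an occupancy count is 1 iff no OTHER element hits.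
lemma pv_countP_eq_one_iff {α : Type} [DecidableEq α] (l : List α) (hl : l.Nodup)
    (i : α) (hi : i ∈ l) (p : α → Bool) (hp : p i = true) :
    l.countP p = 1 ↔ ∀ j ∈ l, j ≠ i → ¬ p j = true := by
  rw [(List.perm_cons_erase hi).countP_eq p, List.countP_cons]
  simp only [hp, if_pos]
  constructor
  · intro h j hj hne
    have h0 : List.countP p (l.erase i) = 0 := by omega
    rw [List.countP_eq_zero] at h0
    exact h0 j ((List.Nodup.mem_erase_iff hl).mpr ⟨hne, hj⟩)
  · intro h
    have h0 : List.countP p (l.erase i) = 0 := by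
      rw [List.countP_eq_zero]
      intro a ha
      obtain ⟨hne, hmem⟩ := (List.Nodup.mem_erase_iff hl).mp ha
      exact h a hmem hne
    omega

-- Pointwise: queen i is "safe" in B's tables iff A's inner loop reports no collision.
lemma pv_point (genome : List Int) (i : Nat) (hi : i ∈ List.range 8) :
    (((pvTables genome).1.getD ((i : Int) - PySem.List.pyGetD genome (i : Int) 0) 0 = 1
      ∧ (pvTables genome).2.getD ((i : Int) + PySem.List.pyGetD genome (i : Int) 0) 0 = 1)
     ↔ ¬ ((List.range 8).any (fun (j : Nat) => decide (i ≠ j ∧ ((i : Int) - (j : Int)).natAbs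
            = (PySem.List.pyGetD genome (j : Int) 0
               - PySem.List.pyGetD genome (i : Int) 0).natAbs)) = true)) := by
  rw [pv_table_fst, pv_table_snd]
  have h1 := pv_countP_eq_one_iff (List.range 8) List.nodup_range i hi
      (fun (j : Nat) => ((j : Int) - PySem.List.pyGetD genome (j : Int) 0)
          == ((i : Int) - PySem.List.pyGetD genome (i : Int) 0)) (by simp)
  have h2 := pv_countP_eq_one_iff (List.range 8) List.nodup_range i hi
      (fun (j : Nat) => ((j : Int) + PySem.List.pyGetD genome (j : Int) 0)
          == ((i : Int) + PySem.List.pyGetD genome (i : Int) 0)) (by simp)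
  rw [Nat.cast_eq_one, Nat.cast_eq_one, h1, h2]
  simp only [List.any_eq_true, decide_eq_true_eq, beq_iff_eq, not_exists, not_and]
  constructor
  · rintro ⟨c1, c2⟩ j hj hne habs
    have d1 := c1 j hj (Ne.symm hne)
    have d2 := c2 j hj (Ne.symm hne)
    omega
  · intro hno
    refine ⟨?_, ?_⟩ <;>
      · intro j hj hne heq
        have hni := hno j hj (Ne.symm hne)
        omega

-- ===== VERDICT (by name: the statement is the Claim_ definition above) =====
theorem eval_fitness_spec : Claim_equal_eval_fitness := by
  intro genome _
  unfold Spec_eval_fitness eval_fitness eval_fitness_alt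
  by_cases hg : (List.range 8).any (fun i => !(genome.contains (i : Int))) = true
  · simp only [hg, if_true]
  · simp only [Bool.not_eq_true] at hg
    simp only [hg, Bool.false_eq_true, if_false]
    simp only [pv_foldl_or, Bool.false_or]
    rw [PySem.List.foldl_ite_add_one, PySem.List.foldl_ite_add_one]
    have hcong : (List.range 8).countP
        (fun (i : Nat) => decide ((pvTables genome).1.getD ((i : Int) - PySem.List.pyGetD genome (i : Int) 0) 0 = 1
           ∧ (pvTables genome).2.getD ((i : Int) + PySem.List.pyGetD genome (i : Int) 0) 0 = 1))
        = (List.range 8).countP (fun i => !((List.range 8).any (fun (j : Nat) => decide (i ≠ j ∧ ((i : Int) - (j : Int)).natAbs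
            = (PySem.List.pyGetD genome (j : Int) 0
               - PySem.List.pyGetD genome (i : Int) 0).natAbs)))) := by
      apply List.countP_congr
      intro i hi
      simpa using pv_point genome i hi
    rw [hcong]
    have hlen := List.length_eq_countP_add_countP
      (fun i => ((List.range 8).any (fun (j : Nat) => decide (i ≠ j ∧ ((i : Int) - (j : Int)).natAbs
          = (PySem.List.pyGetD genome (j : Int) 0
             - PySem.List.pyGetD genome (i : Int) 0).natAbs)))) (l := List.range 8)
    simp only [List.length_range] at hlen
    simp only [decide_not, Bool.decide_eq_true] at hlen ⊢
    omega
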